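-- pv_equiv track=rewrite | github.com/bmuralid/Pure-Fortran | xf2p.py | _clean_fortran_code_lines
-- ===== SOURCE A (Python) =====
-- def split_fortran_comment(line: str) -> tuple[str, str]:
--     in_str = False
--     quote = ""
--     out: list[str] = []
--     for ch in line:
--         if in_str:
--             out.append(ch)
--             if ch == quote:
--                 in_str = False
--         else:
--             if ch in ("'", '"'):
--                 in_str = True
--                 quote = ch
--                 out.append(ch)
--             elif ch == "!":
--                 code = "".join(out).rstrip()
--                 comment = line[len("".join(out)) + 1 :].strip()
--                 return code, comment
--             else:
--                 out.append(ch)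
--     return "".join(out).rstrip(), ""
--
-- def _clean_fortran_code_lines(src: str) -> list[str]:
--     out: list[str] = []
--     for raw in src.splitlines():
--         code, _c = split_fortran_comment(raw)
--         s = code.strip()
--         if s:
--             out.append(s)
--     return out
-- ===== SOURCE B (Python) =====
-- def _comment_index(line: str) -> int:
--     """Index of the first '!' outside quoted literals, or -1.
--
--     Instead of a per-character in-string state machine, jump over each
--     quoted literal with str.find: an unmatched opening quote swallows the
--     rest of the line (find returns -1)."""
--     i = 0
--     n = len(line)
--     while i < n:
--         c = line[i]
--         if c == "!":
--             return i
--         if c == "'" or c == '"':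
--             j = line.find(c, i + 1)
--             if j == -1:
--                 return -1
--             i = j + 1
--         else:
--             i += 1
--     return -1
--
--
-- def _clean_fortran_code_lines(src: str) -> list[str]:
--     cleaned = []
--     for line in src.splitlines():
--         i = _comment_index(line)
--         cleaned.append((line if i < 0 else line[:i]).strip())
--     return [s for s in cleaned if s]
-- ===== Notes on version B (the rewrite author's own statement) =====
-- stated objective: alternative
-- what changed: Replaces the per-character in-string/quote/out-accumulator state machine with an index search that jumps over each quoted literal via str.find and slices the line at the first unquoted exclamation mark, collecting results with a filter comprehension instead of an append loop.
import Mathlib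
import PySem

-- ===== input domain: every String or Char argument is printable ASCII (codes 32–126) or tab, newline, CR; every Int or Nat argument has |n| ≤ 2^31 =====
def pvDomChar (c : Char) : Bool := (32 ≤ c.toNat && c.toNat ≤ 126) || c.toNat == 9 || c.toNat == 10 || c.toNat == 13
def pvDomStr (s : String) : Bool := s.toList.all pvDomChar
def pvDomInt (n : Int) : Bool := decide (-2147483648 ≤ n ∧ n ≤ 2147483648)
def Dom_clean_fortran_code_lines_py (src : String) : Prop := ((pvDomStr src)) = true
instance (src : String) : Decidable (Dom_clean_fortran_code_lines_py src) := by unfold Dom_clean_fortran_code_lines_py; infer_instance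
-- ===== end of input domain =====

-- B replaces A's per-character in-string state machine (accumulating characters) by an
-- index search that jumps over quoted literals and slices the line at the first unquoted exclamation mark
-- (objective: alternative).


-- ===== PORT A =====
-- Loop of split_fortran_comment: state (in_str, quote, out); `quote` starts as Python's ""
-- (a value never consulted while in_str is false), rendered here by the dummy char ' '.
-- The comment slice line[len(out)+1:] is `drop (out.length + 1)` (nonnegative start, exact).
def pvSplitLoop (line : List Char) (rest : List Char) (in_str : Bool) (quote : Char)
    (out : List Char) : List Char × List Char :=
  match rest with
  | [] => (PySem.Chars.rstrip out, [])
  | ch :: rs =>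
    if in_str then
      pvSplitLoop line rs (if ch = quote then false else true) quote (out ++ [ch])
    else if ch = '\'' ∨ ch = '"' then
      pvSplitLoop line rs true ch (out ++ [ch])
    else if ch = '!' then
      (PySem.Chars.rstrip out, PySem.Chars.strip (line.drop (out.length + 1)))
    else
      pvSplitLoop line rs in_str quote (out ++ [ch])

def pvSplitFortranComment (line : String) : String × String :=
  let r := pvSplitLoop line.toList line.toList false ' ' []
  (String.ofList r.1, String.ofList r.2)

def clean_fortran_code_lines_py (src : String) : List String :=
  (PySem.Str.splitlines src).foldl
    (fun out raw =>
      let code := (pvSplitFortranComment raw).1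
      let s := PySem.Str.strip code
      if s ≠ "" then out ++ [s] else out) []

-- ===== PORT B =====
-- Loop of _comment_index over the remaining suffix, `i` = number of characters consumed;
-- `line.find(c, i + 1)` is the first index of c in the suffix after the opening quote,
-- i.e. `rs.findIdx? (· == c)` (exact: find with a nonnegative in-range start).
def pvCommentIdx (rest : List Char) (i : Nat) : Option Nat :=
  match rest with
  | [] => none
  | c :: rs =>
    if c = '!' then some i
    else if c = '\'' ∨ c = '"' then
      match rs.findIdx? (· == c) with
      | none => none
      | some j => pvCommentIdx (rs.drop (j + 1)) (i + j + 2)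
    else pvCommentIdx rs (i + 1)
termination_by rest.length
decreasing_by
  all_goals simp only [List.length_drop, List.length_cons]
  all_goals omega

def pvCodeOf (line : String) : String :=
  let cs := line.toList
  String.ofList (match pvCommentIdx cs 0 with
    | none => PySem.Chars.strip cs
    | some i => PySem.Chars.strip (cs.take i))

def clean_fortran_code_lines_py_alt (src : String) : List String :=
  (((PySem.Str.splitlines src).map pvCodeOf).filter (fun s => s ≠ ""))

-- ===== PRECONDITION & SPEC =====
def Spec_clean_fortran_code_lines_py (src : String) (out : List String) : Prop := out = clean_fortran_code_lines_py_alt src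
instance (src : String) (out : List String) : Decidable (Spec_clean_fortran_code_lines_py src out) := by unfold Spec_clean_fortran_code_lines_py; infer_instance

-- ===== CLAIM (what is proved, stated in full; the proofs are below) =====
def Claim_equal_clean_fortran_code_lines_py : Prop := ∀ (src : String), Dom_clean_fortran_code_lines_py src → Spec_clean_fortran_code_lines_py src (clean_fortran_code_lines_py src)

-- ===== LEMMAS AND PROOFS =====

-- proof-only: the comment index relative to the current suffix
def pvRelIdx (rest : List Char) : Option Nat :=
  match rest with
  | [] => none
  | c :: rs =>
    if c = '!' then some 0
    else if c = '\'' ∨ c = '"' then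
      match rs.findIdx? (· == c) with
      | none => none
      | some j => (pvRelIdx (rs.drop (j + 1))).map (fun m => j + 2 + m)
    else (pvRelIdx rs).map (fun m => 1 + m)
termination_by rest.length
decreasing_by
  all_goals simp only [List.length_drop, List.length_cons]
  all_goals omega

theorem pvCommentIdx_eq_relIdx (rest : List Char) (i : Nat) :
    pvCommentIdx rest i = (pvRelIdx rest).map (fun m => i + m) := by
  induction rest using pvRelIdx.induct generalizing i with
  | case1 => simp [pvCommentIdx, pvRelIdx]
  | case2 rs => simp [pvCommentIdx, pvRelIdx]
  | case3 c rs h1 h2 hf => simp [pvCommentIdx, pvRelIdx, h1, h2, hf]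
  | case4 c rs h1 h2 j hf ih =>
      rw [pvCommentIdx, pvRelIdx]
      simp only [h1, h2, if_neg, if_pos, hf]
      rw [ih]
      cases pvRelIdx (rs.drop (j + 1)) <;> simp <;> omega
  | case5 c rs h1 h2 ih =>
      rw [pvCommentIdx, pvRelIdx]
      simp only [h1, h2, if_neg]
      rw [ih]
      cases pvRelIdx rs <;> simp <;> omega

theorem pv_rstrip_cons (c : Char) (t : List Char) :
    PySem.Chars.rstrip (c :: t) =
      if PySem.Chars.rstrip t = [] then (if PySem.Chars.isspace c then [] else [c])
      else c :: PySem.Chars.rstrip t := by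
  unfold PySem.Chars.rstrip
  rw [show (c :: t).reverse = t.reverse ++ [c] by simp]
  rw [List.dropWhile_append]
  by_cases h : List.dropWhile PySem.Chars.isspace t.reverse = []
  · rw [if_pos (by simp [h]), if_pos (by simp [h])]
    by_cases hc : PySem.Chars.isspace c <;> simp [hc]
  · rw [if_neg (by simp [h]), if_neg (by simp [h])]
    simp
theorem pv_lstrip_cons (c : Char) (t : List Char) :
    PySem.Chars.lstrip (c :: t) =
      if PySem.Chars.isspace c then PySem.Chars.lstrip t else c :: t := by
  by_cases h : PySem.Chars.isspace c <;> simp [PySem.Chars.lstrip, h]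
theorem pv_rstrip_eq_nil_iff (t : List Char) :
    PySem.Chars.rstrip t = [] ↔ ∀ c ∈ t, PySem.Chars.isspace c := by
  unfold PySem.Chars.rstrip
  simp [List.dropWhile_eq_nil_iff]
theorem pv_lstrip_eq_nil_iff (t : List Char) :
    PySem.Chars.lstrip t = [] ↔ ∀ c ∈ t, PySem.Chars.isspace c := by
  unfold PySem.Chars.lstrip
  simp [List.dropWhile_eq_nil_iff]
theorem pv_lstrip_rstrip_comm (l : List Char) :
    PySem.Chars.lstrip (PySem.Chars.rstrip l) = PySem.Chars.rstrip (PySem.Chars.lstrip l) := by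
  induction l with
  | nil => rfl
  | cons c t ih =>
      by_cases hc : PySem.Chars.isspace c <;> by_cases ht : PySem.Chars.rstrip t = []
      · have hl : PySem.Chars.lstrip t = [] := by
          rw [pv_lstrip_eq_nil_iff]; exact (pv_rstrip_eq_nil_iff t).mp ht
        rw [pv_rstrip_cons, if_pos ht, if_pos hc]
        rw [pv_lstrip_cons, if_pos hc, hl]
        rfl
      · rw [pv_rstrip_cons, if_neg ht, pv_lstrip_cons, if_pos hc, ih, pv_lstrip_cons, if_pos hc]
      · rw [pv_rstrip_cons, if_pos ht, if_neg hc]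
        rw [pv_lstrip_cons, if_neg hc]
        rw [pv_lstrip_cons, if_neg hc]
        rw [pv_rstrip_cons, if_pos ht, if_neg hc]
      · rw [pv_rstrip_cons, if_neg ht]
        rw [pv_lstrip_cons, if_neg hc]
        rw [pv_lstrip_cons, if_neg hc]
        rw [pv_rstrip_cons, if_neg ht]

theorem pv_dropWhile_idem (p : Char → Bool) (l : List Char) :
    List.dropWhile p (List.dropWhile p l) = List.dropWhile p l := by
  induction l with
  | nil => rfl
  | cons c t ih =>
      by_cases h : p c = true
      · simp [List.dropWhile_cons, h, ih]
      · simp [List.dropWhile_cons, h]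

theorem pv_rstrip_rstrip (l : List Char) :
    PySem.Chars.rstrip (PySem.Chars.rstrip l) = PySem.Chars.rstrip l := by
  unfold PySem.Chars.rstrip
  simp [pv_dropWhile_idem]

theorem pv_strip_rstrip (l : List Char) :
    PySem.Chars.strip (PySem.Chars.rstrip l) = PySem.Chars.strip l := by
  unfold PySem.Chars.strip
  rw [pv_lstrip_rstrip_comm, pv_rstrip_rstrip]

theorem pvSplitLoop_instr (line rest : List Char) (q : Char) (pre : List Char) :
    pvSplitLoop line rest true q pre =
      (match rest.findIdx? (· == q) with
      | none => (PySem.Chars.rstrip (pre ++ rest), ([] : List Char))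
      | some j => pvSplitLoop line (rest.drop (j + 1)) false q (pre ++ rest.take (j + 1))) := by
  induction rest generalizing pre with
  | nil => simp [pvSplitLoop]
  | cons ch rs ih =>
      rw [List.findIdx?_cons]
      by_cases h : ch = q
      · simp only [h, beq_self_eq_true, if_pos]
        rw [pvSplitLoop]
        simp [h]
      · have hb : (ch == q) = false := by simp [h]
        simp only [hb, Bool.false_eq_true, if_neg, if_false]
        rw [pvSplitLoop]
        simp only [if_pos, if_neg, h, ite_false, ite_true]
        rw [ih (pre ++ [ch])]
        cases hf : rs.findIdx? (· == q) with
        | none => simp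
        | some j => simp [List.drop_succ_cons, List.take_succ_cons]

theorem pvSplitLoop_code (line rest : List Char) (q : Char) (pre : List Char) :
    (pvSplitLoop line rest false q pre).1 =
      PySem.Chars.rstrip (pre ++ rest.take ((pvRelIdx rest).getD rest.length)) := by
  induction rest using pvRelIdx.induct generalizing q pre with
  | case1 => simp [pvSplitLoop, pvRelIdx]
  | case2 rs =>
      rw [pvSplitLoop, pvRelIdx]
      simp
  | case3 c rs h1 h2 hf =>
      rw [pvSplitLoop, pvRelIdx]
      simp only [h1, h2, hf, if_true, if_false, ite_true, ite_false, Bool.false_eq_true]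
      rw [pvSplitLoop_instr]
      simp [hf]
  | case4 c rs h1 h2 j hf ih =>
      rw [pvSplitLoop, pvRelIdx]
      simp only [h1, h2, hf, if_true, if_false, ite_true, ite_false, Bool.false_eq_true]
      rw [pvSplitLoop_instr]
      simp only [hf]
      rw [ih]
      cases hr : pvRelIdx (rs.drop (j + 1)) with
      | none =>
          simp only [hr, Option.map_none, Option.getD_none, List.take_length]
          rw [List.append_assoc, List.append_assoc, List.take_append_drop]
          simp
      | some m =>
          simp only [hr, Option.map_some, Option.getD_some]
          rw [List.append_assoc (pre ++ [c]), ← List.take_add,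
              show j + 2 + m = (j + 1 + m) + 1 by omega, List.take_succ_cons]
          simp
  | case5 c rs h1 h2 ih =>
      rw [pvSplitLoop, pvRelIdx]
      simp only [h1, h2, if_false, ite_false, Bool.false_eq_true]
      rw [ih]
      cases hr : pvRelIdx rs with
      | none =>
          simp [hr]
      | some m =>
          simp only [hr, Option.map_some, Option.getD_some]
          have : 1 + m = m + 1 := by omega
          rw [this]
          simp [List.take_succ_cons]

theorem pv_perline (line : String) :
    PySem.Str.strip (pvSplitFortranComment line).1 = pvCodeOf line := by
  unfold pvSplitFortranComment pvCodeOf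
  dsimp only
  rw [pvCommentIdx_eq_relIdx]
  simp only [PySem.Str.strip, String.toList_ofList]
  apply congrArg String.ofList
  rw [pvSplitLoop_code line.toList line.toList ' ' [], List.nil_append, pv_strip_rstrip]
  cases hr : pvRelIdx line.toList with
  | none =>
      simp only [Option.map_none, Option.getD_none]
      rw [List.take_of_length_le (by simp)]
  | some i => simp

theorem pvA_foldl (ls : List String) (acc : List String) :
    ls.foldl (fun out raw =>
      let code := (pvSplitFortranComment raw).1
      let s := PySem.Str.strip code
      if s ≠ "" then out ++ [s] else out) acc
    = acc ++ (ls.map (fun raw => PySem.Str.strip (pvSplitFortranComment raw).1)).filter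
        (fun s => s ≠ "") := by
  induction ls generalizing acc with
  | nil => simp
  | cons a t ih =>
      simp only [List.foldl_cons, List.map_cons, List.filter_cons]
      by_cases h : PySem.Str.strip (pvSplitFortranComment a).1 = ""
      · simp only [h, ite_false]
        rw [ih]
        simp
      · rw [ih]
        simp [h]


-- ===== VERDICT (by name: the statement is the Claim_ definition above) =====
theorem clean_fortran_code_lines_py_spec : Claim_equal_clean_fortran_code_lines_py := by
  unfold Claim_equal_clean_fortran_code_lines_py
  intro src _
  unfold Spec_clean_fortran_code_lines_py clean_fortran_code_lines_py clean_fortran_code_lines_py_alt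
  rw [pvA_foldl, List.nil_append]
  simp only [pv_perline]
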